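-- pv_equiv track=rewrite | github.com/GrahamTheCoder/gitsnow | cli/dependencies.py | build_column_lineage_paths
-- ===== SOURCE A (Python) =====
-- def build_column_lineage_paths(
--     target_column_key: str,
--     edges_by_target: dict[str, set[str]],
--     max_depth: int = 10,
-- ) -> list[list[str]]:
--     """
--     Build all column lineage paths from sources to the target column.
--     Paths are returned as lists of column keys in source -> target order.
--     """
--
--     def _dfs(current: str, depth: int, visiting: set[str]) -> list[list[str]]:
--         if current in visiting:
--             return []
--         if depth <= 0:
--             return [[current]]
--
--         sources = edges_by_target.get(current)
--         if not sources:
--             return [[current]]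
--
--         visiting.add(current)
--         paths: list[list[str]] = []
--         for src in sorted(sources):
--             for sub_path in _dfs(src, depth - 1, visiting):
--                 paths.append(sub_path + [current])
--         visiting.remove(current)
--         return paths
--
--     return _dfs(target_column_key, max_depth, set())
-- ===== SOURCE B (Python) =====
-- def build_column_lineage_paths(
--     target_column_key: str,
--     edges_by_target: dict[str, set[str]],
--     max_depth: int = 10,
-- ) -> list[list[str]]:
--     """Iterative explicit-stack DFS; frames carry (node, remaining depth,
--     path from node's parent up to the target)."""
--     results: list[list[str]] = []
--     stack = [(target_column_key, max_depth, [])]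
--     while stack:
--         node, depth, anc = stack.pop()
--         if node in anc:
--             continue
--         sources = edges_by_target.get(node)
--         if depth <= 0 or not sources:
--             results.append([node] + anc)
--             continue
--         tail = [node] + anc
--         for src in sorted(sources, reverse=True):
--             stack.append((src, depth - 1, tail))
--     return results
-- ===== Notes on version B (the rewrite author's own statement) =====
-- stated objective: alternative
-- what changed: Replaces A's recursive nested-helper DFS (with a mutated visiting set and per-level result concatenation) by a single iterative loop over an explicit frame stack (node, remaining depth, ancestor path), emitting each complete path when a terminal frame is popped.
import Mathlib
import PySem

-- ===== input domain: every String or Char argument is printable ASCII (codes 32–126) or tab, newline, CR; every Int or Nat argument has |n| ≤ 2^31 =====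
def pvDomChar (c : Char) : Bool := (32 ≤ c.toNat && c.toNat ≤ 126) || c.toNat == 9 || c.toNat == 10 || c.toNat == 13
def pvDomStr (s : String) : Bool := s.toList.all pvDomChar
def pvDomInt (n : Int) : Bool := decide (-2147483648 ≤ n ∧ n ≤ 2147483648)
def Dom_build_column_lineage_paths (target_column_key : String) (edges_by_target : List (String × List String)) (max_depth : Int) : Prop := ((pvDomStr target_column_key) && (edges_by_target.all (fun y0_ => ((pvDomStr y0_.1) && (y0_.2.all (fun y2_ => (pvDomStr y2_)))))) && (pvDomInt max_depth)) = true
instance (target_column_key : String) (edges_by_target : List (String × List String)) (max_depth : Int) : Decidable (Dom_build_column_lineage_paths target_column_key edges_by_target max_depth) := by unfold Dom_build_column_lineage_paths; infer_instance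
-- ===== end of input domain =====

-- B replaces A's recursive DFS by an explicit-stack iterative DFS (different decomposition, same cost); objective: alternative.

-- Shared input conversion: the Python parameter is dict[str, set[str]]; the assoc-list
-- argument becomes a PySem.Dict whose values are Python sets (distinct elements).
def pvEdges (edges_by_target : List (String × List String)) : PySem.Dict String (List String) :=
  PySem.Dict.ofList (edges_by_target.map (fun p => (p.1, PySem.Set.ofList p.2)))

-- ===== PORT A =====
def pvDfsA (edges : PySem.Dict String (List String)) (current : String) (depth : Int) (visiting : PySem.Set String) : List (List String) :=
  if current ∈ visiting then []
  else if depth ≤ 0 then [[current]]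
  else
    let sources := (edges.get? current).getD []
    if sources = [] then [[current]]
    else
      let v := PySem.Set.add visiting current
      (PySem.List.sorted sources (fun x => x) false).foldl
        (fun paths src =>
          (pvDfsA edges src (depth - 1) v).foldl (fun ps sub_path => ps ++ [sub_path ++ [current]]) paths)
        []
termination_by depth.toNat
decreasing_by omega

def build_column_lineage_paths (target_column_key : String) (edges_by_target : List (String × List String)) (max_depth : Int) : List (List String) :=
  pvDfsA (pvEdges edges_by_target) target_column_key max_depth PySem.Set.empty

-- ===== PORT B =====
-- termination measure for the stack loop (proof device only; cited by decreasing_by)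
def pvWeight (E : Nat) (d : Int) : Nat := (E + 2) ^ (d.toNat + 1)

def pvStackMeasure (E : Nat) (st : List (String × Int × List String)) : Nat :=
  (st.map (fun f => pvWeight E f.2.1)).sum

theorem pvStackMeasure_foldl_push (E : Nat) (d' : Int) (t : List String) :
    ∀ (L : List String) (st : List (String × Int × List String)),
      pvStackMeasure E (L.foldl (fun st src => (src, d', t) :: st) st) =
        L.length * pvWeight E d' + pvStackMeasure E st := by
  intro L
  induction L with
  | nil => intro st; simp
  | cons x xs ih =>
      intro st
      rw [List.foldl_cons]
      have h2 := ih ((x, d', t) :: st)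
      simp only [pvStackMeasure, List.map_cons, List.sum_cons, List.length_cons] at h2 ⊢
      rw [h2]
      ring

theorem pvSources_len_le (edges : PySem.Dict String (List String)) (node : String)
    (sources : List String) (hs : sources = (edges.get? node).getD [])
    (hne : sources ≠ []) : sources.length ≤ (edges.values.map List.length).sum := by
  have hget : edges.get? node = some sources := by
    cases h : edges.get? node with
    | none => simp [h] at hs; exact absurd hs hne
    | some v => simp [h] at hs; rw [hs]
  have hmem : sources ∈ edges.values := by
    have := PySem.Dict.mem_items_of_get?_eq_some edges hget
    exact List.mem_map_of_mem this
  exact List.single_le_sum (by intro x hx; exact Nat.zero_le x) _ (List.mem_map_of_mem hmem)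

def pvLoopB (edges : PySem.Dict String (List String)) (stack : List (String × Int × List String)) (results : List (List String)) : List (List String) :=
  match stack with
  | [] => results
  | (node, depth, anc) :: rest =>
    if node ∈ anc then pvLoopB edges rest results
    else
      let sources := (edges.get? node).getD []
      if depth ≤ 0 ∨ sources = [] then pvLoopB edges rest (results ++ [node :: anc])
      else
        pvLoopB edges
          ((PySem.List.sorted sources (fun x => x) true).foldl
            (fun st src => (src, depth - 1, node :: anc) :: st) rest)
          results
termination_by pvStackMeasure ((edges.values.map List.length).sum) stack
decreasing_by
  · simp only [pvStackMeasure, List.map_cons, List.sum_cons]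
    have : 0 < pvWeight ((edges.values.map List.length).sum) depth := Nat.pow_pos (by omega)
    omega
  · simp only [pvStackMeasure, List.map_cons, List.sum_cons]
    have : 0 < pvWeight ((edges.values.map List.length).sum) depth := Nat.pow_pos (by omega)
    omega
  · rename_i hcyc hterm
    push_neg at hterm
    obtain ⟨hd, hne⟩ := hterm
    rw [pvStackMeasure_foldl_push]
    simp only [pvStackMeasure, List.map_cons, List.sum_cons, pvWeight]
    have h3 : depth.toNat = (depth - 1).toNat + 1 := by omega
    rw [h3]
    have hlen : (PySem.List.sorted ((edges.get? node).getD []) (fun x => x) true).length ≤ (edges.values.map List.length).sum := by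
      rw [PySem.List.length_sorted]
      exact pvSources_len_le edges node _ rfl hne
    have hpos : 0 < ((edges.values.map List.length).sum + 2) ^ ((depth - 1).toNat + 1) := Nat.pow_pos (by omega)
    have hfin : (PySem.List.sorted ((edges.get? node).getD []) (fun x => x) true).length *
        ((edges.values.map List.length).sum + 2) ^ ((depth - 1).toNat + 1) <
        ((edges.values.map List.length).sum + 2) ^ ((depth - 1).toNat + 1 + 1) := by
      rw [pow_succ]
      calc (PySem.List.sorted ((edges.get? node).getD []) (fun x => x) true).length *
            ((edges.values.map List.length).sum + 2) ^ ((depth - 1).toNat + 1)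
          ≤ (edges.values.map List.length).sum * ((edges.values.map List.length).sum + 2) ^ ((depth - 1).toNat + 1) :=
            Nat.mul_le_mul_right _ hlen
        _ = ((edges.values.map List.length).sum + 2) ^ ((depth - 1).toNat + 1) * (edges.values.map List.length).sum := Nat.mul_comm _ _
        _ < ((edges.values.map List.length).sum + 2) ^ ((depth - 1).toNat + 1) * ((edges.values.map List.length).sum + 2) := by
            nlinarith [hpos]
    omega

def build_column_lineage_paths_alt (target_column_key : String) (edges_by_target : List (String × List String)) (max_depth : Int) : List (List String) :=
  pvLoopB (pvEdges edges_by_target) [(target_column_key, max_depth, [])] []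

-- ===== PRECONDITION & SPEC =====
def Spec_build_column_lineage_paths (target_column_key : String) (edges_by_target : List (String × List String)) (max_depth : Int) (out : List (List String)) : Prop := out = build_column_lineage_paths_alt target_column_key edges_by_target max_depth
instance (target_column_key : String) (edges_by_target : List (String × List String)) (max_depth : Int) (out : List (List String)) : Decidable (Spec_build_column_lineage_paths target_column_key edges_by_target max_depth out) := by unfold Spec_build_column_lineage_paths; infer_instance

-- ===== CLAIM (what is proved, stated in full; the proofs are below) =====
def Claim_equal_build_column_lineage_paths : Prop := ∀ (target_column_key : String) (edges_by_target : List (String × List String)) (max_depth : Int), Dom_build_column_lineage_paths target_column_key edges_by_target max_depth → Spec_build_column_lineage_paths target_column_key edges_by_target max_depth (build_column_lineage_paths target_column_key edges_by_target max_depth)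

-- ===== LEMMAS AND PROOFS =====

theorem pvFoldlInsert_values_nodup :
    ∀ (l : List (String × List String)) (d : PySem.Dict String (List String)),
      (∀ v ∈ d.values, v.Nodup) →
      ∀ v ∈ (l.foldl (fun d p => d.insert p.1 (PySem.Set.ofList p.2)) d).values, v.Nodup := by
  intro l
  induction l with
  | nil => intro d hd; exact hd
  | cons p ps ih =>
      intro d hd
      rw [List.foldl_cons]
      apply ih
      intro v hv
      rcases PySem.Dict.mem_values_insert d p.1 (PySem.Set.ofList p.2) v hv with h | h
      · rw [h]; exact PySem.Set.nodup_ofList p.2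
      · exact hd v h

theorem pvEdges_values_nodup (edges_by_target : List (String × List String)) :
    ∀ v ∈ (pvEdges edges_by_target).values, v.Nodup := by
  have h : pvEdges edges_by_target =
      edges_by_target.foldl (fun d p => d.insert p.1 (PySem.Set.ofList p.2)) PySem.Dict.empty := by
    unfold pvEdges
    show (edges_by_target.map (fun p => (p.1, PySem.Set.ofList p.2))).foldl
        (fun d p => d.insert p.1 p.2) PySem.Dict.empty = _
    rw [List.foldl_map]
  rw [h]
  exact pvFoldlInsert_values_nodup edges_by_target PySem.Dict.empty
    (by intro v hv; simp [PySem.Dict.values, PySem.Dict.empty] at hv)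

theorem pvGet?_of_getD_ne (edges : PySem.Dict String (List String)) (node : String)
    (hne : ¬ (edges.get? node).getD [] = []) : edges.get? node = some ((edges.get? node).getD []) := by
  cases h : edges.get? node with
  | none => rw [h] at hne; simp at hne
  | some v => simp [h]

theorem pvSorted_lt (sources : List String) (hnd : sources.Nodup) :
    (PySem.List.sorted sources (fun x => x) false).Pairwise (· < ·) := by
  have hperm := PySem.List.sorted_perm sources (fun x => x) false
  have hnd' : (PySem.List.sorted sources (fun x => x) false).Nodup := hperm.nodup_iff.mpr hnd
  have hle := PySem.List.sorted_pairwise sources (fun x => x)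
  exact (List.Pairwise.and hle hnd').imp (by intro a b h; exact lt_of_le_of_ne h.1 h.2)

theorem pvSorted_rev_eq (sources : List String) (hnd : sources.Nodup) :
    PySem.List.sorted sources (fun x => x) true =
      (PySem.List.sorted sources (fun x => x) false).reverse := by
  apply PySem.List.sorted_rev_eq_of_perm_of_pairwise_gt
  · exact (List.reverse_perm _).trans (PySem.List.sorted_perm _ _ _)
  · rw [List.pairwise_reverse]
    exact pvSorted_lt sources hnd

theorem pvDfsA_congr (edges : PySem.Dict String (List String)) :
    ∀ (n : Nat) (c : String) (d : Int) (V V' : PySem.Set String), d.toNat ≤ n →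
      (∀ x, x ∈ V ↔ x ∈ V') → pvDfsA edges c d V = pvDfsA edges c d V' := by
  intro n
  induction n with
  | zero =>
      intro c d V V' hn hV
      have hd : d ≤ 0 := by omega
      rw [pvDfsA, pvDfsA]
      by_cases hc : c ∈ V'
      · simp [hc, (hV c).mpr hc]
      · have hc0 : c ∉ V := fun h => hc ((hV c).mp h)
        simp [hc, hc0, hd]
  | succ n ih =>
      intro c d V V' hn hV
      rw [pvDfsA, pvDfsA]
      by_cases hc : c ∈ V'
      · simp [hc, (hV c).mpr hc]
      · have hc0 : c ∉ V := fun h => hc ((hV c).mp h)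
        simp only [hc, hc0, if_false]
        by_cases hd : d ≤ 0
        · simp [hd]
        · simp only [hd, if_false]
          by_cases hsrc : (edges.get? c).getD [] = []
          · simp [hsrc]
          · simp only [hsrc, if_false]
            apply PySem.List.foldl_congr_mem
            intro acc x hx
            have heq : pvDfsA edges x (d - 1) (PySem.Set.add V c) = pvDfsA edges x (d - 1) (PySem.Set.add V' c) := by
              apply ih x (d - 1) _ _ (by omega)
              intro y
              rw [PySem.Set.mem_add, PySem.Set.mem_add, hV y]
            rw [heq]

theorem pvFoldl_append_map {A B : Type} (g : A → B) :
    ∀ (l : List A) (init : List B), l.foldl (fun acc x => acc ++ [g x]) init = init ++ l.map g := by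
  intro l
  induction l with
  | nil => intro init; simp
  | cons x xs ih => intro init; simp [ih]

theorem pvFoldl_push_eq {A B : Type} (f : A → B) :
    ∀ (l : List A) (st : List B), l.foldl (fun st x => f x :: st) st = (l.map f).reverse ++ st := by
  intro l
  induction l with
  | nil => intro st; simp
  | cons x xs ih => intro st; simp [ih]

-- A's per-node double loop, written as a flatMap
theorem pvDfsA_unfold (edges : PySem.Dict String (List String)) (c : String) (d : Int) (V : PySem.Set String)
    (hc : c ∉ V) (hd : ¬ d ≤ 0) (hsrc : ¬ (edges.get? c).getD [] = []) :
    pvDfsA edges c d V =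
      (PySem.List.sorted ((edges.get? c).getD []) (fun x => x) false).flatMap
        (fun src => (pvDfsA edges src (d - 1) (PySem.Set.add V c)).map (fun q => q ++ [c])) := by
  rw [pvDfsA]
  simp only [hc, hd, hsrc, if_false]
  generalize (PySem.List.sorted ((edges.get? c).getD []) (fun x => x) false) = ys
  induction ys using List.reverseRecOn with
  | nil => simp
  | append_singleton ys y ih =>
      simp only [List.foldl_append, List.foldl_cons, List.foldl_nil, List.flatMap_append, ih,
        List.flatMap_cons, List.flatMap_nil, List.append_nil]
      rw [pvFoldl_append_map]

-- main bridge: the stack loop computes the concatenated recursive results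
theorem pvLoopB_spec (edges : PySem.Dict String (List String))
    (hnd : ∀ v ∈ edges.values, v.Nodup) :
    ∀ (st : List (String × Int × List String)) (res : List (List String)),
      pvLoopB edges st res =
        res ++ st.flatMap (fun f => (pvDfsA edges f.1 f.2.1 f.2.2).map (fun q => q ++ f.2.2)) := by
  intro st res
  induction st, res using pvLoopB.induct edges with
  | case1 res => simp [pvLoopB]
  | case2 res node depth anc rest hcyc ih =>
      rw [pvLoopB]
      simp only [hcyc, if_true, ih, List.flatMap_cons]
      rw [pvDfsA]
      simp [hcyc]
  | case3 res node depth anc rest hcyc srcs hterm ih =>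
      have hterm' : depth ≤ 0 ∨ (edges.get? node).getD [] = [] := hterm
      rw [pvLoopB, if_neg hcyc, if_pos hterm', ih, List.flatMap_cons]
      have hA : pvDfsA edges node depth anc = [[node]] := by
        rw [pvDfsA, if_neg hcyc]
        rcases hterm' with h | h
        · rw [if_pos h]
        · by_cases hd0 : depth ≤ 0
          · rw [if_pos hd0]
          · rw [if_neg hd0]; simp [h]
      rw [hA]
      simp
  | case4 res node depth anc rest hcyc srcs hterm ih =>
      have hterm' : ¬ (depth ≤ 0 ∨ (edges.get? node).getD [] = []) := hterm
      rw [pvLoopB, if_neg hcyc, if_neg hterm', ih]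
      have hterm2 : ¬ depth ≤ 0 ∧ ¬ (edges.get? node).getD [] = [] := by
        constructor <;> (intro h; exact hterm' (by tauto))
      obtain ⟨hd, hsrc⟩ := hterm2
      have hndsrc : ((edges.get? node).getD []).Nodup := by
        apply hnd
        have := PySem.Dict.mem_items_of_get?_eq_some edges (pvGet?_of_getD_ne edges node hsrc)
        exact List.mem_map_of_mem this
      rw [pvSorted_rev_eq _ hndsrc, pvFoldl_push_eq, List.flatMap_append, List.map_reverse,
        List.reverse_reverse, List.flatMap_map, List.flatMap_cons]
      rw [pvDfsA_unfold edges node depth anc hcyc hd hsrc, List.map_flatMap]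
      have hfun : ∀ src : String,
          (pvDfsA edges src (depth - 1) (node :: anc)).map (fun q => q ++ (node :: anc)) =
            ((pvDfsA edges src (depth - 1) (PySem.Set.add anc node)).map (fun q => q ++ [node])).map (fun q => q ++ anc) := by
        intro src
        have hcg : pvDfsA edges src (depth - 1) (node :: anc) = pvDfsA edges src (depth - 1) (PySem.Set.add anc node) := by
          apply pvDfsA_congr edges (depth - 1).toNat src (depth - 1) _ _ (le_refl _)
          intro y
          rw [PySem.Set.mem_add, List.mem_cons]
          tauto
        rw [hcg, List.map_map]
        apply List.map_congr_left
        intro q hq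
        simp [List.append_assoc]
      simp only [Function.comp_def, hfun, List.append_assoc]

-- ===== VERDICT (by name: the statement is the Claim_ definition above) =====
theorem build_column_lineage_paths_spec : Claim_equal_build_column_lineage_paths := by
  intro target edges depth _hdom
  unfold Spec_build_column_lineage_paths build_column_lineage_paths build_column_lineage_paths_alt
  rw [pvLoopB_spec (pvEdges edges) (pvEdges_values_nodup edges)]
  simp [PySem.Set.empty]
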